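-- pv_equiv track=rewrite | github.com/megelclarkchangcoco/ComLab | app.py | embedded_pick_best_name
-- ===== SOURCE A (Python) =====
-- def embedded_pick_best_name(items, device_type):
--     """
--     Pick a readable physical device name from grouped PnP entries.
--     Avoid names like USB Input Device or HID-compliant mouse if a better name exists.
--     """
--     generic_words = [
--         "hid-compliant",
--         "usb input device",
--         "input device",
--         "consumer control",
--         "vendor-defined",
--         "composite device",
--     ]
--
--     names = []
--     for item in items:
--         name = item.get("Name") or ""
--         if name and name not in names:
--             names.append(name)
--
--     # Prefer names that are not generic Windows driver labels.
--     for name in names: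
--         lower_name = name.lower()
--         if not any(word in lower_name for word in generic_words):
--             return name
--
--     # If everything is generic, show clean inventory type instead of driver text.
--     return device_type
-- ===== SOURCE B (Python) =====
-- def embedded_pick_best_name(items, device_type):
--     generic_words = [
--         "hid-compliant",
--         "usb input device",
--         "input device",
--         "consumer control",
--         "vendor-defined",
--         "composite device",
--     ]
--     for item in items:
--         name = item.get("Name") or ""
--         if not name:
--             continue
--         lower_name = name.lower()
--         if not any(word in lower_name for word in generic_words):
--             return name
--     return device_type
-- ===== Notes on version B (the rewrite author's own statement) =====
-- stated objective: simpler
-- what changed: B drops A's intermediate dedup names list and second scan: a single pass over items returns the first non-empty non-generic name directly (the dedup never affects which name is returned first), falling back to device_type.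
import Mathlib
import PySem

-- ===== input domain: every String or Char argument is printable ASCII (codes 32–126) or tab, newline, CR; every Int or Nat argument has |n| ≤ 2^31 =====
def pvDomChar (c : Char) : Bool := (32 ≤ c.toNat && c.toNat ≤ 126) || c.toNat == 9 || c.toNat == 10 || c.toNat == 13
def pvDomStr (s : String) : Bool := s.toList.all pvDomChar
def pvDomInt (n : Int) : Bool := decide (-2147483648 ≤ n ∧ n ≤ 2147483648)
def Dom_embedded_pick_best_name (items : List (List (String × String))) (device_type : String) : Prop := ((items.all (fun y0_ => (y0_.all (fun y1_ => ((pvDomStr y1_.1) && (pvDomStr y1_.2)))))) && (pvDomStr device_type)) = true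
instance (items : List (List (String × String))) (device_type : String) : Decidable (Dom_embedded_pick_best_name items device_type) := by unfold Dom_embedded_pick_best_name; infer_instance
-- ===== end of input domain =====

-- B replaces A's two passes (build a dedup list of names, then scan it) by one direct pass
-- over items returning the first non-empty non-generic name; objective: simpler.


-- ===== PORT A =====
-- A: collect deduplicated names in a first pass, then scan that list for the first non-generic one.
def pvGenericWords : List String := ["hid-compliant", "usb input device", "input device", "consumer control", "vendor-defined", "composite device"]

def pvIsGeneric (name : String) : Bool :=
  pvGenericWords.any (fun word => PySem.Str.isIn word (PySem.Str.lower name))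

def embedded_pick_best_name (items : List (List (String × String))) (device_type : String) : String :=
  let names := items.foldl (fun names item =>
    let name := ((PySem.Dict.mk item).get? "Name").getD ""
    if name ≠ "" ∧ name ∉ names then names ++ [name] else names) []
  match names.find? (fun name => !(pvIsGeneric name)) with
  | some name => name
  | none => device_type

-- ===== PORT B =====
-- B: one pass over items, returning the first non-empty, non-generic name directly.
def embedded_pick_best_name_alt (items : List (List (String × String))) (device_type : String) : String :=
  match items with
  | [] => device_type
  | item :: rest =>
    let name := ((PySem.Dict.mk item).get? "Name").getD ""
    if name = "" then embedded_pick_best_name_alt rest device_type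
    else if pvIsGeneric name then embedded_pick_best_name_alt rest device_type
    else name

-- ===== PRECONDITION & SPEC =====
def Spec_embedded_pick_best_name (items : List (List (String × String))) (device_type : String) (out : String) : Prop := out = embedded_pick_best_name_alt items device_type
instance (items : List (List (String × String))) (device_type : String) (out : String) : Decidable (Spec_embedded_pick_best_name items device_type out) := by unfold Spec_embedded_pick_best_name; infer_instance

-- ===== CLAIM (what is proved, stated in full; the proofs are below) =====
def Claim_equal_embedded_pick_best_name : Prop := ∀ (items : List (List (String × String))) (device_type : String), Dom_embedded_pick_best_name items device_type → Spec_embedded_pick_best_name items device_type (embedded_pick_best_name items device_type)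

-- ===== LEMMAS AND PROOFS =====

-- A's dedup fold only ever appends to its accumulator.
theorem pv_dedup_append (items : List (List (String × String))) (acc : List String) :
    ∃ t, items.foldl (fun names item =>
      let name := ((PySem.Dict.mk item).get? "Name").getD ""
      if name ≠ "" ∧ name ∉ names then names ++ [name] else names) acc = acc ++ t := by
  induction items generalizing acc with
  | nil => exact ⟨[], by simp⟩
  | cons item rest ih =>
    simp only [List.foldl_cons]
    by_cases h : (((PySem.Dict.mk item).get? "Name").getD "" ≠ "" ∧ ((PySem.Dict.mk item).get? "Name").getD "" ∉ acc)
    · obtain ⟨t, ht⟩ := ih (acc ++ [((PySem.Dict.mk item).get? "Name").getD ""])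
      refine ⟨((PySem.Dict.mk item).get? "Name").getD "" :: t, ?_⟩
      simp only [if_pos h] at *
      simpa using ht
    · obtain ⟨t, ht⟩ := ih acc
      exact ⟨t, by simp only [if_neg h]; exact ht⟩

-- Key invariant: if no name in the accumulator is non-generic, then scanning
-- the dedup result for the first non-generic name agrees with B's direct pass.
theorem pv_main (items : List (List (String × String))) (device_type : String)
    (acc : List String) (hacc : acc.find? (fun name => !(pvIsGeneric name)) = none) :
    ((items.foldl (fun names item =>
        let name := ((PySem.Dict.mk item).get? "Name").getD ""
        if name ≠ "" ∧ name ∉ names then names ++ [name] else names) acc).find?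
          (fun name => !(pvIsGeneric name))).getD device_type
      = embedded_pick_best_name_alt items device_type := by
  induction items generalizing acc with
  | nil => simp [embedded_pick_best_name_alt, hacc]
  | cons item rest ih =>
    by_cases h0 : ((PySem.Dict.mk item).get? "Name").getD "" = ""
    · simp only [List.foldl_cons, embedded_pick_best_name_alt, h0]
      simp only [ne_eq, not_true_eq_false, false_and, if_false, if_pos rfl]
      exact ih acc hacc
    · by_cases hmem : ((PySem.Dict.mk item).get? "Name").getD "" ∈ acc
      · have hg : pvIsGeneric (((PySem.Dict.mk item).get? "Name").getD "") = true := by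
          have := List.find?_eq_none.mp hacc _ hmem
          simpa using this
        simp only [List.foldl_cons, embedded_pick_best_name_alt]
        rw [if_neg (by simp [hmem]), if_neg h0, if_pos hg]
        exact ih acc hacc
      · simp only [List.foldl_cons, embedded_pick_best_name_alt]
        rw [if_pos ⟨h0, hmem⟩, if_neg h0]
        by_cases hg : pvIsGeneric (((PySem.Dict.mk item).get? "Name").getD "") = true
        · rw [if_pos hg]
          apply ih
          rw [List.find?_eq_none]
          intro x hx
          rcases List.mem_append.mp hx with hx | hx
          · exact List.find?_eq_none.mp hacc x hx
          · simp only [List.mem_singleton] at hx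
            simp [hx, hg]
        · rw [if_neg hg]
          obtain ⟨t, ht⟩ := pv_dedup_append rest
            (acc ++ [((PySem.Dict.mk item).get? "Name").getD ""])
          rw [ht, List.append_assoc, List.find?_append, hacc]
          simp only [Option.none_or, List.singleton_append, List.find?_cons]
          simp only [Bool.not_eq_true] at hg
          simp [hg]

-- ===== VERDICT (by name: the statement is the Claim_ definition above) =====
theorem embedded_pick_best_name_spec : Claim_equal_embedded_pick_best_name := by
  intro items device_type _
  unfold Spec_embedded_pick_best_name embedded_pick_best_name
  have h := pv_main items device_type [] (by simp)
  rw [← h]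
  cases hfind : ((items.foldl (fun names item =>
      let name := ((PySem.Dict.mk item).get? "Name").getD ""
      if name ≠ "" ∧ name ∉ names then names ++ [name] else names) []).find?
        (fun name => !(pvIsGeneric name))) <;> simp [hfind]
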